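-- pv_equiv track=rewrite | github.com/stoa-platform/stoa | control-plane-api/src/repositories/onboarding.py | _last_step
-- ===== SOURCE A (Python) =====
-- def _last_step(steps_completed: dict | None) -> str | None:
--     """Find the most recently completed step by timestamp."""
--     if not steps_completed:
--         return None
--     latest_step = None
--     latest_ts = ""
--     for step, ts in steps_completed.items():
--         if ts and ts > latest_ts:
--             latest_ts = ts
--             latest_step = step
--     return latest_step
-- ===== SOURCE B (Python) =====
-- def _last_step(steps_completed: dict | None) -> str | None:
--     """Find the most recently completed step by timestamp (sort-then-select)."""
--     if steps_completed is None:
--         return None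
--     cands = [(step, ts) for step, ts in steps_completed.items() if ts]
--     cands.sort(key=lambda p: p[1], reverse=True)
--     return cands[0][0] if cands else None
-- ===== Notes on version B (the rewrite author's own statement) =====
-- stated objective: alternative
-- what changed: Replaces the incremental max-tracking scan with filter truthy timestamps, stable sort descending by timestamp, take the first element (stability preserves the first-seen tie rule).
import Mathlib
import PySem

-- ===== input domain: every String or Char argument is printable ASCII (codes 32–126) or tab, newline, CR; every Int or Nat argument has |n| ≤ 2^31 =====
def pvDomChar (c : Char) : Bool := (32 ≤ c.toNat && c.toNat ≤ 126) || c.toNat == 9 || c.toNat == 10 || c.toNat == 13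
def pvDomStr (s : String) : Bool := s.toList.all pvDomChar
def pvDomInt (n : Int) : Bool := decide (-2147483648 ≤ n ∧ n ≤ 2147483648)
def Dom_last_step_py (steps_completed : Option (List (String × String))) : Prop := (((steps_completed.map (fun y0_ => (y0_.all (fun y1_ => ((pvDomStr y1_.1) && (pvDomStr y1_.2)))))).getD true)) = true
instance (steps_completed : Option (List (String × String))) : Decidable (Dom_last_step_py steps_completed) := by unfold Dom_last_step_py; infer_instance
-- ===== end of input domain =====

-- B replaces A's incremental max-tracking scan with filter-truthy / stable-sort-descending / take-first (alternative decomposition, not claimed faster).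
-- ===== PORT A =====
-- A's loop: state (latest_step, latest_ts), updated when ts is truthy and strictly greater
def lastStepLoop (items : List (String × String)) : Option String × String :=
  items.foldl (fun st p => if p.2 ≠ "" ∧ st.2 < p.2 then (some p.1, p.2) else st)
    ((none : Option String), "")

def last_step_py (steps_completed : Option (List (String × String))) : Option String :=
  match steps_completed with
  | none => none
  | some l =>
    -- the Python receives a dict built from these pairs: PySem.Dict.ofList
    let d := PySem.Dict.ofList l
    if d.items = [] then none
    else (lastStepLoop d.items).1

-- ===== PORT B =====
def last_step_py_alt (steps_completed : Option (List (String × String))) : Option String :=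
  match steps_completed with
  | none => none
  | some l =>
    let cands := (PySem.Dict.ofList l).items.filter (fun p => p.2 != "")
    match PySem.List.sorted cands (·.2) true with
    | [] => none
    | p :: _ => some p.1

-- ===== PRECONDITION & SPEC =====
def Spec_last_step_py (steps_completed : Option (List (String × String))) (out : Option String) : Prop := out = last_step_py_alt steps_completed
instance (steps_completed : Option (List (String × String))) (out : Option String) : Decidable (Spec_last_step_py steps_completed out) := by unfold Spec_last_step_py; infer_instance

-- ===== CLAIM (what is proved, stated in full; the proofs are below) =====
def Claim_equal_last_step_py : Prop := ∀ (steps_completed : Option (List (String × String))), Dom_last_step_py steps_completed → Spec_last_step_py steps_completed (last_step_py steps_completed)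

-- ===== LEMMAS AND PROOFS =====

-- ===== VERDICT (by name: the statement is the Claim_ definition above) =====
lemma empty_lt_of_ne (s : String) (h : s ≠ "") : "" < s := by
  rw [String.lt_iff_toList_lt]
  have h2 : s.toList ≠ [] := by simpa using h
  cases hl : s.toList with
  | nil => exact absurd hl h2
  | cons c cs => simp

lemma sorted_rev_append_one (xs : List (String × String)) (x : String × String) :
    PySem.List.sorted (xs ++ [x]) (·.2) true =
      PySem.List.insertBy (fun a b => decide ((b.2 : String) < a.2)) x
        (PySem.List.sorted xs (·.2) true) := by
  simp [PySem.List.sorted, List.foldl_append]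

lemma loop_eq_sorted (xs : List (String × String)) :
    lastStepLoop xs =
      (match PySem.List.sorted (xs.filter (fun p => p.2 != "")) (·.2) true with
       | [] => ((none : Option String), "")
       | p :: _ => (some p.1, p.2)) := by
  induction xs using List.reverseRecOn with
  | nil => rfl
  | append_singleton xs x ih =>
    unfold lastStepLoop at *
    rw [List.foldl_append, ih, List.filter_append]
    by_cases hx : x.2 = ""
    · simp [hx]
    · simp only [List.filter_cons, List.filter_nil, hx, bne_iff_ne, ne_eq, not_false_iff, if_pos]
      rw [sorted_rev_append_one]
      cases hs : PySem.List.sorted (xs.filter (fun p => p.2 != "")) (·.2) true with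
      | nil =>
        simp only [PySem.List.insertBy]
        simp
        exact ⟨hx, String.lt_iff_toList_lt.mp (empty_lt_of_ne _ hx)⟩
      | cons h t =>
        simp only [PySem.List.insertBy]
        by_cases hlt : (h.2 : String) < x.2
        · simp [hlt, hx]
          intro hle
          exact absurd (String.lt_iff_toList_lt.mp hlt) (not_lt.mpr hle)
        · simp [hlt, hx]
          intro hl
          exact absurd (String.lt_iff_toList_lt.mpr hl) hlt

theorem last_step_py_spec : Claim_equal_last_step_py := by
  intro sc _
  unfold Spec_last_step_py last_step_py last_step_py_alt
  cases sc with
  | none => rfl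
  | some l =>
    dsimp only
    rw [show (lastStepLoop (PySem.Dict.ofList l).items) =
      (match PySem.List.sorted ((PySem.Dict.ofList l).items.filter (fun p => p.2 != "")) (·.2) true with
       | [] => ((none : Option String), "")
       | p :: _ => (some p.1, p.2)) from loop_eq_sorted _]
    by_cases he : (PySem.Dict.ofList l).items = []
    · simp only [he, if_pos]
      rfl
    · simp only [he, if_false]
      cases PySem.List.sorted ((PySem.Dict.ofList l).items.filter (fun p => p.2 != "")) (·.2) true with
      | nil => rfl
      | cons p t => rfl
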